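-- pv_equiv track=rewrite | github.com/haithanh03/BTL-TTNT-2023 | puzz_8.py | process_matrix
-- ===== SOURCE A (Python) =====
-- def process_matrix(TEST, INIT):
--     n = len(TEST)
--
--     # Khởi tạo mảng TMP với giá trị từ 1 đến n-1
--     #TMP = [0] * (n * n)
--
--     # Khởi tạo từ điển để lưu trữ chỉ số của mỗi giá trị trong TMP
--     index_dict = {}
--
--     cnt = 1
--
--     # Duyệt qua ma trận TEST và gán giá trị vào mảng TMP và từ điển
--     for row in range(n):
--         for col in range(n):
--             value = TEST[row][col]
--             #TMP[cnt - 1] = value  # Chỉ số của TMP giảm đi 1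
--             index_dict[value] = cnt  # Lưu chỉ số vào từ điển
--             cnt += 1
--
--     index_dict[TEST[2][2]] = 0
--
--     # Khởi tạo ma trận CHECK với các phần tử ban đầu là 0
--     CHECK = [[0 for _ in range(n)] for _ in range(n)]
--
--     for row in range(n):
--         for col in range(n):
--             value = INIT[row][col]
--             CHECK[row][col] = index_dict[value]  # Sử dụng từ điển để lấy chỉ số
--
--     return CHECK
-- ===== SOURCE B (Python) =====
-- def process_matrix(TEST, INIT):
--     # Inverted "scatter" strategy: instead of looking each INIT value up, walk TEST
--     # in row-major order and stamp its running 1-based position onto every INIT cell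
--     # holding that value (later stamps overwrite earlier ones), then a final pass
--     # zeroes the cells equal to the center value TEST[2][2].
--     n = len(TEST)
--     CHECK = [[0] * n for _ in range(n)]
--     cnt = 1
--     for row in range(n):
--         for col in range(n):
--             value = TEST[row][col]
--             for r in range(n):
--                 for c in range(n):
--                     if INIT[r][c] == value:
--                         CHECK[r][c] = cnt
--             cnt += 1
--     center = TEST[2][2]
--     for r in range(n):
--         for c in range(n):
--             if INIT[r][c] == center:
--                 CHECK[r][c] = 0
--     return CHECK
-- ===== Notes on version B (the rewrite author's own statement) =====
-- stated objective: alternative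
-- what changed: Inverts the data flow: instead of building a value-to-position dictionary and looking each INIT cell up, B walks TEST in row-major order and scatters each running 1-based position onto every INIT cell holding that value (later stamps overwrite earlier ones), then a final pass zeroes the cells equal to the center value TEST[2][2].
import Mathlib
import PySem

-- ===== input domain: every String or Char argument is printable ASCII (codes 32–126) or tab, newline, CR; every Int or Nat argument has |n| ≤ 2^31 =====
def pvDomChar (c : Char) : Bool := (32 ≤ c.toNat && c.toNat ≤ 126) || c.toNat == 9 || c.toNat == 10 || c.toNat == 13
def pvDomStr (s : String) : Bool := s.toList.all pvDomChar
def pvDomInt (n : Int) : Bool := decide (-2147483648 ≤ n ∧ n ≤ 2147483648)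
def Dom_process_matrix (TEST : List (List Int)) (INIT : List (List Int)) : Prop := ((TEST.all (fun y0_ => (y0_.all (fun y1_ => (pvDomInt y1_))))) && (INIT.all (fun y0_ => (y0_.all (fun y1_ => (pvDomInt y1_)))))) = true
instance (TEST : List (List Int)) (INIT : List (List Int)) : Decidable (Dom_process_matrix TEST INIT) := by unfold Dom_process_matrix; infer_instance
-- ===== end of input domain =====

-- B inverts the data flow: it scatters each TEST position onto matching INIT cells instead of
-- looking each INIT cell up in a dictionary (alternative decomposition, same results).

-- ===== PORT A =====
-- M[r][c]; the `.getD` defaults stand for Python's IndexError, excluded by Pre_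
def pvAt (M : List (List Int)) (r c : Int) : Int :=
  (PySem.List.pyGet? ((PySem.List.pyGet? M r).getD []) c).getD 0

def process_matrix (TEST : List (List Int)) (INIT : List (List Int)) : List (List Int) :=
  let n : Int := TEST.length
  let st := (PySem.List.pyRange 0 n 1).foldl (fun st row =>
      (PySem.List.pyRange 0 n 1).foldl (fun (st : PySem.Dict Int Int × Int) col =>
        (st.1.insert (pvAt TEST row col) st.2, st.2 + 1)) st)
    ((PySem.Dict.empty : PySem.Dict Int Int), (1 : Int))
  -- index_dict[TEST[2][2]] = 0
  let d := st.1.insert (pvAt TEST 2 2) 0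
  -- CHECK built as zeros and overwritten cell by cell, row-major
  (PySem.List.pyRange 0 n 1).map (fun row =>
    (PySem.List.pyRange 0 n 1).map (fun col =>
      -- index_dict[value]; KeyError (missing key) excluded by Pre_, 0 is the total-function placeholder
      d.getD (pvAt INIT row col) 0))

-- ===== PORT B =====
-- one stamping pass: write cnt into every CHECK cell whose INIT value equals `value`
def pvStamp (INIT : List (List Int)) (n value cnt : Int) (CHECK : List (List Int)) : List (List Int) :=
  (PySem.List.pyRange 0 n 1).map (fun r =>
    (PySem.List.pyRange 0 n 1).map (fun c =>
      if pvAt INIT r c = value then cnt else pvAt CHECK r c))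

def process_matrix_alt (TEST : List (List Int)) (INIT : List (List Int)) : List (List Int) :=
  let n : Int := TEST.length
  let CHECK0 := (PySem.List.pyRange 0 n 1).map (fun _ =>
      (PySem.List.pyRange 0 n 1).map (fun _ => (0 : Int)))
  let st := (PySem.List.pyRange 0 n 1).foldl (fun st row =>
      (PySem.List.pyRange 0 n 1).foldl (fun (st : List (List Int) × Int) col =>
        (pvStamp INIT n (pvAt TEST row col) st.2 st.1, st.2 + 1)) st)
    (CHECK0, (1 : Int))
  let center := pvAt TEST 2 2
  -- final pass: zero the cells equal to the center value
  (PySem.List.pyRange 0 n 1).map (fun r =>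
    (PySem.List.pyRange 0 n 1).map (fun c =>
      if pvAt INIT r c = center then 0 else pvAt st.1 r c))

-- ===== PRECONDITION & SPEC =====
-- Pre_ excludes exactly the inputs on which A raises: TEST with fewer than 3 rows or rows
-- shorter than len(TEST) (IndexError on TEST[2][2] / TEST[row][col]), INIT too small for the
-- n×n traversal (IndexError), and INIT cells whose value is absent from TEST's n×n block (KeyError).
def Pre_process_matrix (TEST : List (List Int)) (INIT : List (List Int)) : Prop :=
  3 ≤ TEST.length ∧ (∀ r ∈ TEST, TEST.length ≤ r.length) ∧
  TEST.length ≤ INIT.length ∧ (∀ r ∈ INIT.take TEST.length, TEST.length ≤ r.length) ∧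
  (∀ r ∈ INIT.take TEST.length, ∀ v ∈ r.take TEST.length, ∃ r' ∈ TEST, v ∈ r'.take TEST.length)
instance (TEST : List (List Int)) (INIT : List (List Int)) : Decidable (Pre_process_matrix TEST INIT) := by unfold Pre_process_matrix; infer_instance

def pvWitness_process_matrix : List (List Int) × List (List Int) :=
  ([[1,2,3],[4,5,6],[7,8,0]], [[2,1,3],[5,4,6],[8,7,0]])

def Spec_process_matrix (TEST : List (List Int)) (INIT : List (List Int)) (out : List (List Int)) : Prop := out = process_matrix_alt TEST INIT
instance (TEST : List (List Int)) (INIT : List (List Int)) (out : List (List Int)) : Decidable (Spec_process_matrix TEST INIT out) := by unfold Spec_process_matrix; infer_instance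

-- ===== CLAIM (what is proved, stated in full; the proofs are below) =====
def Claim_equal_process_matrix : Prop := ∀ (TEST : List (List Int)) (INIT : List (List Int)), Dom_process_matrix TEST INIT → Pre_process_matrix TEST INIT → Spec_process_matrix TEST INIT (process_matrix TEST INIT)

-- ===== LEMMAS AND PROOFS =====

-- value at a cell of both programs, recast as a front-recursive search (later entries win)
def pvLook (xs : List Int) (c : Int) (v : Int) : Option Int :=
  match xs with
  | [] => none
  | x :: t =>
    match pvLook t (c + 1) v with
    | some r => some r
    | none => if v = x then some c else none

-- A's dict-building loop, characterised by pvLook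
theorem pvLook_foldl (xs : List Int) (d : PySem.Dict Int Int) (c v : Int) :
    ((xs.foldl (fun (st : PySem.Dict Int Int × Int) x => (st.1.insert x st.2, st.2 + 1)) (d, c)).1).getD v 0
      = (pvLook xs c v).getD (d.getD v 0) := by
  induction xs generalizing d c with
  | nil => simp [pvLook]
  | cons x t ih =>
    simp only [List.foldl_cons, pvLook]
    rw [ih]
    cases pvLook t (c + 1) v with
    | some r => simp
    | none => rw [PySem.Dict.getD_insert]; split_ifs <;> simp

-- reading a freshly built n×n grid at an in-range cell
theorem pvAt_grid (g : Int → Int → Int) (n r c : Int)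
    (hr : 0 ≤ r ∧ r < n) (hc : 0 ≤ c ∧ c < n) :
    pvAt ((PySem.List.pyRange 0 n 1).map (fun r' =>
      (PySem.List.pyRange 0 n 1).map (fun c' => g r' c'))) r c = g r c := by
  unfold pvAt
  rw [PySem.List.pyGet?_of_nonneg _ hr.1, PySem.List.pyRange_one]
  have hrn : r.toNat < (n - 0).toNat := by omega
  have hcn : c.toNat < (n - 0).toNat := by omega
  simp only [List.map_map, List.getElem?_map, List.getElem?_range, hrn,
    Option.map_some, Option.getD_some, Function.comp]
  rw [PySem.List.pyGet?_of_nonneg _ hc.1]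
  simp only [List.getElem?_map, List.getElem?_range, hcn,
    Option.map_some, Option.getD_some, Function.comp]
  have e1 : (0 : Int) + (r.toNat : Int) = r := by omega
  have e2 : (0 : Int) + (c.toNat : Int) = c := by omega
  rw [e1, e2]

-- B's stamping loop, characterised by the same pvLook
theorem stamp_fold (INIT : List (List Int)) (n : Int) (xs : List Int) (CHECK : List (List Int))
    (cnt r c : Int) (hr : 0 ≤ r ∧ r < n) (hc : 0 ≤ c ∧ c < n) :
    pvAt ((xs.foldl (fun (st : List (List Int) × Int) v =>
        (pvStamp INIT n v st.2 st.1, st.2 + 1)) (CHECK, cnt)).1) r c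
      = (pvLook xs cnt (pvAt INIT r c)).getD (pvAt CHECK r c) := by
  induction xs generalizing CHECK cnt with
  | nil => simp [pvLook]
  | cons x t ih =>
    simp only [List.foldl_cons, pvLook]
    rw [ih _ _]
    unfold pvStamp
    rw [pvAt_grid _ n r c hr hc]
    cases pvLook t (cnt + 1) (pvAt INIT r c) with
    | some p => simp
    | none => split_ifs <;> simp

-- a nested row/col loop over a running state IS a fold over the flattened value list
theorem foldl_nested {σ : Type} (l m : List Int) (step : σ → Int → σ) (F : Int → Int → Int)
    (init : σ) :
    l.foldl (fun st a => m.foldl (fun st b => step st (F a b)) st) init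
      = (l.flatMap (fun a => (m.map (F a)))).foldl step init := by
  induction l generalizing init with
  | nil => rfl
  | cons a t ih => simp [List.flatMap_cons, List.foldl_append, List.foldl_map, ih]

-- ===== VERDICT (by name: the statement is the Claim_ definition above) =====
theorem process_matrix_spec : Claim_equal_process_matrix := by
  intro TEST INIT _ _
  unfold Spec_process_matrix
  dsimp only [process_matrix, process_matrix_alt]
  apply List.map_congr_left
  intro row hrow
  apply List.map_congr_left
  intro col hcol
  rw [PySem.List.mem_pyRange_one] at hrow hcol
  rw [foldl_nested (PySem.List.pyRange 0 (TEST.length : Int) 1)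
        (PySem.List.pyRange 0 (TEST.length : Int) 1)
        (fun (st : PySem.Dict Int Int × Int) x => (st.1.insert x st.2, st.2 + 1))
        (fun a b => pvAt TEST a b) ((PySem.Dict.empty : PySem.Dict Int Int), (1 : Int)),
      foldl_nested (PySem.List.pyRange 0 (TEST.length : Int) 1)
        (PySem.List.pyRange 0 (TEST.length : Int) 1)
        (fun (st : List (List Int) × Int) v => (pvStamp INIT (TEST.length : Int) v st.2 st.1, st.2 + 1))
        (fun a b => pvAt TEST a b)
        ((PySem.List.pyRange 0 (TEST.length : Int) 1).map (fun _ =>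
          (PySem.List.pyRange 0 (TEST.length : Int) 1).map (fun _ => (0 : Int))), (1 : Int)),
      stamp_fold _ _ _ _ _ _ _ hrow hcol, pvAt_grid (fun _ _ => 0) _ _ _ hrow hcol,
      PySem.Dict.getD_insert]
  split_ifs with h
  · rfl
  · rw [pvLook_foldl]
    simp
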